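-- pv_equiv track=rewrite | github.com/nassimhemdane/AOSE | ProsumerAgent.py | intelligent_purchase
-- ===== SOURCE A (Python) =====
-- import math
--
-- def intelligent_purchase(optimalP,job):
--     buy=[]
--     j_list=[]
--     for i in range(job[1]):
--         actmin=math.inf
--         jactmin=0
--         act=(0,0)
--         for j in range(len(optimalP)):
--             if(job[0][j]==1 and (j not in j_list)):
--                     if(optimalP[j][1]<actmin and optimalP[j][1]>0 ):
--                         actmin=optimalP[j][1]
--                         act = optimalP[j]
--                         jactmin=j
--         buy.append((jactmin,act[0]))
--         j_list.append(jactmin)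
--     return buy
-- ===== SOURCE B (Python) =====
-- def intelligent_purchase(optimalP, job):
--     elig = sorted(((p, j, f) for (j, (f, p)), m in zip(enumerate(optimalP), job[0])
--                    if m == 1 and p > 0),
--                   key=lambda t: (t[0], t[1]))
--     k = max(job[1], 0)
--     picks = [(j, f) for (p, j, f) in elig[:k]]
--     return picks + [(0, 0)] * (k - len(picks))
-- ===== Notes on version B (the rewrite author's own statement) =====
-- stated objective: faster
-- what changed: A repeats a full argmin scan over optimalP for each of the job[1] purchases with a growing blacklist; B filters the eligible items once, sorts them by (price, index), takes the k cheapest and pads with (0,0).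
import Mathlib
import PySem

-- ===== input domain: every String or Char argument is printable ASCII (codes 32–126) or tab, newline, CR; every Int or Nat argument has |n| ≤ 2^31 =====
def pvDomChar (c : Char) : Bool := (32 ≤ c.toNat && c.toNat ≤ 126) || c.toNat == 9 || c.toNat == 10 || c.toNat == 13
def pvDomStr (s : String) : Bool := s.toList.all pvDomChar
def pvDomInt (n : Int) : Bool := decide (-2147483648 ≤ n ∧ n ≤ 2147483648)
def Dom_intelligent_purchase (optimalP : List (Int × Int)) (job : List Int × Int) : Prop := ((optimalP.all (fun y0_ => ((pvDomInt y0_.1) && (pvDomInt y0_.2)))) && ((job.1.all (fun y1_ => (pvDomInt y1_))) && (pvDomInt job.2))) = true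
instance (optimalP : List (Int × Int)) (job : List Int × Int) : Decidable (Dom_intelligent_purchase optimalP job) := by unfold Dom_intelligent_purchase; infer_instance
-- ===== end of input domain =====

-- B replaces A's job[1] repeated argmin scans with one filter + sort by (price, index) + take; proved equal on Pre_.

-- ===== PORT A =====
-- inner 'for j in range(len(optimalP))' loop of A; actmin = math.inf is modelled as 'none';
-- job[0][j] is ported as pyGetD job.1 j 0 — exact under Pre_ (the index is in range whenever the loop runs).
def ipScan (optimalP : List (Int × Int)) (mask : List Int) (jlist : List Int) :
    Option Int × Int × (Int × Int) :=
  (PySem.List.pyRange 0 (PySem.List.len optimalP) 1).foldl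
    (fun s j =>
      if PySem.List.pyGetD mask j 0 == 1 && !(decide (j ∈ jlist)) then
        (if (match s.1 with
             | none => true
             | some m => decide ((PySem.List.pyGetD optimalP j ((0 : Int), (0 : Int))).2 < m)) &&
            decide (0 < (PySem.List.pyGetD optimalP j ((0 : Int), (0 : Int))).2) then
          (some (PySem.List.pyGetD optimalP j ((0 : Int), (0 : Int))).2, j,
           PySem.List.pyGetD optimalP j ((0 : Int), (0 : Int)))
        else s)
      else s)
    (none, 0, (0, 0))

def intelligent_purchase (optimalP : List (Int × Int)) (job : List Int × Int) : List (Int × Int) :=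
  ((PySem.List.pyRange 0 job.2 1).foldl
    (fun (st : List (Int × Int) × List Int) _i =>
      (st.1 ++ [((ipScan optimalP job.1 st.2).2.1, (ipScan optimalP job.1 st.2).2.2.1)],
       st.2 ++ [(ipScan optimalP job.1 st.2).2.1]))
    ([], [])).1

-- ===== PORT B =====
-- the eligible triples (price, index, first) drawn from zip(enumerate(optimalP), job[0])
def ipElig (optimalP : List (Int × Int)) (mask : List Int) : List (Int × Int × Int) :=
  (((PySem.List.enumerate optimalP 0).zip mask).filter
      (fun em => em.2 == 1 && decide (0 < em.1.2.2))).map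
    (fun em => (em.1.2.2, em.1.1, em.1.2.1))

def intelligent_purchase_alt (optimalP : List (Int × Int)) (job : List Int × Int) : List (Int × Int) :=
  let elig := PySem.List.sorted2 (ipElig optimalP job.1) (fun t => t.1) (fun t => t.2.1) false
  let k := (max job.2 0).toNat
  let picks := (elig.take k).map (fun t => (t.2.1, t.2.2))
  picks ++ List.replicate (k - picks.length) ((0 : Int), (0 : Int))

-- ===== PRECONDITION & SPEC =====
-- A raises IndexError on job[0][j] exactly when job.2 ≥ 1 and job.1 is shorter than optimalP;
-- Pre_ excludes exactly those inputs (it excludes no input on which A returns).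
def Pre_intelligent_purchase (optimalP : List (Int × Int)) (job : List Int × Int) : Prop :=
  job.2 ≤ 0 ∨ optimalP.length ≤ job.1.length
instance (optimalP : List (Int × Int)) (job : List Int × Int) : Decidable (Pre_intelligent_purchase optimalP job) := by unfold Pre_intelligent_purchase; infer_instance

def pvWitness_intelligent_purchase : (List (Int × Int)) × (List Int × Int) :=
  ([(5, 2), (3, 1)], ([1, 1], 2))

def Spec_intelligent_purchase (optimalP : List (Int × Int)) (job : List Int × Int) (out : List (Int × Int)) : Prop := out = intelligent_purchase_alt optimalP job
instance (optimalP : List (Int × Int)) (job : List Int × Int) (out : List (Int × Int)) : Decidable (Spec_intelligent_purchase optimalP job out) := by unfold Spec_intelligent_purchase; infer_instance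

-- ===== CLAIM (what is proved, stated in full; the proofs are below) =====
def Claim_equal_intelligent_purchase : Prop := ∀ (optimalP : List (Int × Int)) (job : List Int × Int), Dom_intelligent_purchase optimalP job → Pre_intelligent_purchase optimalP job → Spec_intelligent_purchase optimalP job (intelligent_purchase optimalP job)

-- ===== LEMMAS AND PROOFS =====

-- proof-side vocabulary
def ipTriple (jv : Int × (Int × Int)) : Int × Int × Int := (jv.2.2, jv.1, jv.2.1)

def eligD (P : List (Int × Int)) (mask : List Int) : List (Int × Int × Int) :=
  ((PySem.List.enumerate P 0).filter
      (fun jv => PySem.List.pyGetD mask jv.1 0 == 1 && decide (0 < jv.2.2))).map ipTriple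

def ipStep (a : Option (Int × Int × Int)) (x : Int × Int × Int) : Option (Int × Int × Int) :=
  match a with
  | none => some x
  | some m => if x.1 < m.1 then some x else a

def ipBest (xs : List (Int × Int × Int)) : Option (Int × Int × Int) := xs.foldl ipStep none

def ipSigma : Option (Int × Int × Int) → Option Int × Int × (Int × Int)
  | none => (none, 0, (0, 0))
  | some t => (some t.1, t.2.1, (t.2.2, t.1))

def ipG (s : Option Int × Int × (Int × Int)) (t : Int × Int × Int) : Option Int × Int × (Int × Int) :=
  if (match s.1 with | none => true | some m => decide (t.1 < m)) then (some t.1, t.2.1, (t.2.2, t.1)) else s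

def ipLt (m y : Int × Int × Int) : Prop := m.1 < y.1 ∨ (m.1 = y.1 ∧ m.2.1 < y.2.1)

def ipJlt (m y : Int × Int × Int) : Prop := m.2.1 < y.2.1

def keyL (t : Int × Int × Int) : Lex (Int × Int) := toLex (t.1, t.2.1)

def ipOut (t : Int × Int × Int) : Int × Int := (t.2.1, t.2.2)

-- B's zip-built eligibility list equals the index-based one when the mask covers optimalP
lemma ip_elig_eq (P : List (Int × Int)) (mask : List Int) (h : P.length ≤ mask.length) :
    ipElig P mask = eligD P mask := by
  unfold ipElig eligD
  have hz : (PySem.List.enumerate P 0).zip mask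
      = (PySem.List.enumerate P 0).map (fun jv => (jv, PySem.List.pyGetD mask jv.1 0)) := by
    apply List.ext_getElem
    · simp [PySem.List.length_enumerate]
      omega
    · intro i h1 h2
      have hiP : i < P.length := by
        simp [PySem.List.length_enumerate] at h1
        omega
      have him : i < mask.length := by omega
      simp [List.getElem_zip, PySem.List.getElem_enumerate]
      simp [List.getElem?_eq_getElem him]
  rw [hz, List.filter_map, List.map_map]
  rfl


lemma ip_foldl_sigma (xs : List (Int × Int × Int)) (a : Option (Int × Int × Int)) :
    xs.foldl ipG (ipSigma a) = ipSigma (xs.foldl ipStep a) := by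
  induction xs generalizing a with
  | nil => rfl
  | cons x xs ih =>
    rw [List.foldl_cons, List.foldl_cons,
      show ipG (ipSigma a) x = ipSigma (ipStep a x) from ?_, ih]
    cases a with
    | none => rfl
    | some m =>
      by_cases h : x.1 < m.1 <;> simp [ipG, ipSigma, ipStep, h]

lemma ip_foldl_sigma_pairs (l : List (Int × (Int × Int))) :
    l.foldl (fun (s : Option Int × Int × (Int × Int)) jv =>
        if (match s.1 with
            | none => true
            | some m => decide (jv.2.2 < m)) then
          ((some jv.2.2, jv.1, jv.2) : Option Int × Int × (Int × Int))
        else s) (none, 0, (0, 0))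
      = ipSigma (l.foldl (fun s jv => ipStep s (ipTriple jv)) none) := by
  have h := ip_foldl_sigma (l.map ipTriple) none
  rw [List.foldl_map, List.foldl_map] at h
  exact h

-- A's inner scan is the first strict min over the blacklist-filtered eligible list
lemma ip_scan_eq (P : List (Int × Int)) (mask : List Int) (jlist : List Int) :
    ipScan P mask jlist =
      ipSigma (ipBest ((eligD P mask).filter (fun t => !decide (t.2.1 ∈ jlist)))) := by
  have h1 : ipScan P mask jlist = (PySem.List.enumerate P 0).foldl
      (fun s jv =>
        if PySem.List.pyGetD mask jv.1 0 == 1 && !(decide (jv.1 ∈ jlist)) then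
          (if (match s.1 with
               | none => true
               | some m => decide (jv.2.2 < m)) && decide (0 < jv.2.2) then
            (some jv.2.2, jv.1, jv.2)
          else s)
        else s)
      (none, 0, (0, 0)) := by
    unfold ipScan
    rw [PySem.List.enumerate_eq_map_pyRange P ((0 : Int), (0 : Int)), List.foldl_map]
  rw [h1, PySem.List.foldl_if_eq_foldl_filter]
  rw [show (fun (s : Option Int × Int × (Int × Int)) (jv : Int × (Int × Int)) =>
        if (match s.1 with
            | none => true
            | some m => decide (jv.2.2 < m)) && decide (0 < jv.2.2) then
          ((some jv.2.2, jv.1, jv.2) : Option Int × Int × (Int × Int))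
        else s)
      = (fun s jv =>
          if decide (0 < jv.2.2) then
            (if (match s.1 with
                 | none => true
                 | some m => decide (jv.2.2 < m)) then (some jv.2.2, jv.1, jv.2) else s)
          else s) from ?_]
  · rw [PySem.List.foldl_if_eq_foldl_filter]
    rw [List.filter_filter]
    rw [show (fun (jv : Int × (Int × Int)) =>
          decide (0 < jv.2.2) && (PySem.List.pyGetD mask jv.1 0 == 1 && !decide (jv.1 ∈ jlist)))
        = (fun jv => (!decide (jv.1 ∈ jlist)) &&
            (PySem.List.pyGetD mask jv.1 0 == 1 && decide (0 < jv.2.2))) from ?_]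
    · rw [← List.filter_filter]
      rw [show (eligD P mask).filter (fun t => !decide (t.2.1 ∈ jlist))
          = (((PySem.List.enumerate P 0).filter
                (fun jv => PySem.List.pyGetD mask jv.1 0 == 1 && decide (0 < jv.2.2))).filter
              (fun jv => !decide (jv.1 ∈ jlist))).map ipTriple from ?_]
      · rw [show ipBest (((((PySem.List.enumerate P 0).filter
                (fun jv => PySem.List.pyGetD mask jv.1 0 == 1 && decide (0 < jv.2.2))).filter
              (fun jv => !decide (jv.1 ∈ jlist))).map ipTriple))
            = ((((PySem.List.enumerate P 0).filter
                (fun jv => PySem.List.pyGetD mask jv.1 0 == 1 && decide (0 < jv.2.2))).filter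
              (fun jv => !decide (jv.1 ∈ jlist)))).foldl (fun s jv => ipStep s (ipTriple jv)) none
            from by unfold ipBest; rw [List.foldl_map]]
        exact ip_foldl_sigma_pairs _
      · unfold eligD
        rw [List.filter_map]
        rfl
    · funext jv
      cases hA : PySem.List.pyGetD mask jv.1 0 == 1 <;>
        cases hB : decide (jv.1 ∈ jlist) <;>
          cases hC : decide (0 < jv.2.2) <;> rfl
  · funext s jv
    by_cases hp : (0 : Int) < jv.2.2
    · simp [hp]
    · simp [hp]

lemma ipLt_asymm {a b : Int × Int × Int} (h1 : ipLt a b) (h2 : ipLt b a) : False := by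
  rcases h1 with h | ⟨h, h'⟩ <;> rcases h2 with g | ⟨g, g'⟩ <;> omega

lemma ip_best_go (xs : List (Int × Int × Int)) :
    ∀ a, (a :: xs).Pairwise ipJlt →
      ∃ m, xs.foldl ipStep (some a) = some m ∧ m ∈ a :: xs ∧
        ∀ y ∈ a :: xs, y ≠ m → ipLt m y := by
  induction xs with
  | nil =>
    intro a _
    refine ⟨a, rfl, List.mem_cons_self, ?_⟩
    intro y hy hne
    simp at hy
    exact absurd hy hne
  | cons x xs ih =>
    intro a h
    rcases List.pairwise_cons.mp h with ⟨ha, hxxs⟩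
    rcases List.pairwise_cons.mp hxxs with ⟨hx, hxs⟩
    rw [List.foldl_cons]
    by_cases hcmp : x.1 < a.1
    · rw [show ipStep (some a) x = some x by simp [ipStep, hcmp]]
      obtain ⟨m, hm, hmem, hmin⟩ := ih x hxxs
      refine ⟨m, hm, List.mem_cons_of_mem _ hmem, ?_⟩
      intro y hy hne
      rcases List.mem_cons.mp hy with rfl | hy'
      · rcases eq_or_ne m x with rfl | hmx
        · exact Or.inl hcmp
        · have h1 := hmin x List.mem_cons_self hmx.symm
          unfold ipLt at h1 ⊢; omega
      · exact hmin y hy' hne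
    · rw [show ipStep (some a) x = some a by simp [ipStep, hcmp]]
      have hax : (a :: xs).Pairwise ipJlt :=
        List.pairwise_cons.mpr ⟨fun y hy => ha y (List.mem_cons_of_mem _ hy), hxs⟩
      obtain ⟨m, hm, hmem, hmin⟩ := ih a hax
      refine ⟨m, hm, ?_, ?_⟩
      · rcases List.mem_cons.mp hmem with rfl | h'
        · exact List.mem_cons_self
        · exact List.mem_cons_of_mem _ (List.mem_cons_of_mem _ h')
      · intro y hy hne
        rcases List.mem_cons.mp hy with rfl | hy'
        · exact hmin y List.mem_cons_self hne
        rcases List.mem_cons.mp hy' with rfl | hy''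
        · have hj := ha y List.mem_cons_self
          rcases eq_or_ne m a with rfl | hma
          · unfold ipLt; unfold ipJlt at hj; omega
          · have h1 := hmin a List.mem_cons_self hma.symm
            unfold ipLt at h1 ⊢; unfold ipJlt at hj; omega
        · exact hmin y (List.mem_cons_of_mem _ hy'') hne

lemma ip_best_eq_head {M R : List (Int × Int × Int)} (hperm : R.Perm M)
    (hM : M.Pairwise ipJlt) (hR : R.Pairwise ipLt) : ipBest M = R.head? := by
  cases R with
  | nil =>
    have hM : M = [] := (List.Perm.eq_nil hperm.symm)
    subst hM; rfl
  | cons r rest =>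
    have hrM : r ∈ M := hperm.mem_iff.mp List.mem_cons_self
    cases M with
    | nil => simp at hrM
    | cons m0 M' =>
      obtain ⟨m, hm, hmem, hmin⟩ := ip_best_go M' m0 hM
      have hbest : ipBest (m0 :: M') = some m := by
        unfold ipBest; rw [List.foldl_cons]; exact hm
      rw [hbest]
      show some m = some r
      congr 1
      by_contra hne
      have h1 : ipLt m r := hmin r hrM (Ne.symm hne)
      have hmR : m ∈ r :: rest := hperm.mem_iff.mpr hmem
      rcases List.mem_cons.mp hmR with rfl | h'
      · exact hne rfl
      · exact ipLt_asymm h1 ((List.pairwise_cons.mp hR).1 m h')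

lemma ip_sorted2_eq (xs : List (Int × Int × Int)) :
    PySem.List.sorted2 xs (fun t => t.1) (fun t => t.2.1) false =
      PySem.List.sorted xs keyL false := by
  rw [PySem.List.sorted_eq_foldl_insertBy]
  show xs.foldl (fun acc x => PySem.List.insertBy
      (fun a b => decide (a.1 < b.1) || (!decide (b.1 < a.1) && decide (a.2.1 < b.2.1))) x acc) [] = _
  rw [show (fun (a b : Int × Int × Int) =>
        decide (a.1 < b.1) || (!decide (b.1 < a.1) && decide (a.2.1 < b.2.1)))
      = (fun a b => decide (keyL a < keyL b)) from ?_]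
  funext a b
  rcases lt_trichotomy a.1 b.1 with h | h | h <;>
    simp [h, keyL, Prod.Lex.toLex_lt_toLex] <;> omega

lemma ip_keyL_lt_iff (a b : Int × Int × Int) : keyL a < keyL b ↔ ipLt a b := by
  simp [keyL, ipLt, Prod.Lex.toLex_lt_toLex]

lemma ip_eligD_pairwise (P : List (Int × Int)) (mask : List Int) :
    (eligD P mask).Pairwise ipJlt := by
  unfold eligD
  apply List.pairwise_map.mpr
  apply List.Pairwise.filter
  exact PySem.List.pairwise_lt_enumerate P 0

lemma ip_sorted_pairwise_strict (xs : List (Int × Int × Int)) (hj : xs.Pairwise ipJlt) :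
    (PySem.List.sorted xs keyL false).Pairwise ipLt := by
  have h1 := PySem.List.sorted_pairwise xs keyL
  have hne : xs.Pairwise (fun a b => keyL a ≠ keyL b) := by
    refine hj.imp ?_
    intro a b hab he
    have : (a.1, a.2.1) = (b.1, b.2.1) := by
      have := congrArg ofLex he
      simpa [keyL] using this
    unfold ipJlt at hab
    have h2 : a.2.1 = b.2.1 := (Prod.mk.injEq _ _ _ _ ▸ this).2
    omega
  have hnd : (xs.map keyL).Nodup := List.pairwise_map.mpr hne
  have hnd2 : ((PySem.List.sorted xs keyL false).map keyL).Nodup :=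
    (((PySem.List.sorted_perm xs keyL false).map keyL).nodup_iff).mpr hnd
  have h2 : (PySem.List.sorted xs keyL false).Pairwise (fun a b => keyL a ≠ keyL b) :=
    List.pairwise_map.mp hnd2
  exact (h1.and h2).imp (fun {a b} h => (ip_keyL_lt_iff a b).mp (lt_of_le_of_ne h.1 h.2))

lemma ip_sorted_j_ne (xs : List (Int × Int × Int)) (hj : xs.Pairwise ipJlt) :
    (PySem.List.sorted xs keyL false).Pairwise (fun a b => a.2.1 ≠ b.2.1) := by
  have hnd : (xs.map (fun t => t.2.1)).Nodup :=
    List.pairwise_map.mpr (hj.imp (fun h => by unfold ipJlt at h; omega))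
  have hnd2 : ((PySem.List.sorted xs keyL false).map (fun t => t.2.1)).Nodup :=
    (((PySem.List.sorted_perm xs keyL false).map (fun t => t.2.1)).nodup_iff).mpr hnd
  exact List.pairwise_map.mp hnd2

lemma ip_main (P : List (Int × Int)) (mask : List Int) (L : List (Int × Int × Int))
    (hLperm : L.Perm (eligD P mask)) (hLpair : L.Pairwise ipLt)
    (hLj : L.Pairwise (fun a b => a.2.1 ≠ b.2.1)) :
    ∀ (n : Nat) (buy : List (Int × Int)) (jlist : List Int),
      ((fun (st : List (Int × Int) × List Int) =>
          (st.1 ++ [((ipScan P mask st.2).2.1, (ipScan P mask st.2).2.2.1)],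
           st.2 ++ [(ipScan P mask st.2).2.1]))^[n] (buy, jlist)).1
        = buy ++ ((L.filter (fun t => !decide (t.2.1 ∈ jlist))).take n).map ipOut
            ++ List.replicate (n - (L.filter (fun t => !decide (t.2.1 ∈ jlist))).length) (0, 0) := by
  intro n
  induction n with
  | zero => intro buy jlist; simp
  | succ n ih =>
    intro buy jlist
    rw [Function.iterate_succ_apply]
    have hscan : ipScan P mask jlist
        = ipSigma (L.filter (fun t => !decide (t.2.1 ∈ jlist))).head? := by
      rw [ip_scan_eq]
      congr 1
      exact ip_best_eq_head (hLperm.filter _)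
        ((ip_eligD_pairwise P mask).filter _) (hLpair.filter _)
    cases hhead : (L.filter (fun t => !decide (t.2.1 ∈ jlist))).head? with
    | none =>
      have hRnil : L.filter (fun t => !decide (t.2.1 ∈ jlist)) = [] :=
        List.head?_eq_none_iff.mp hhead
      rw [hhead] at hscan
      simp only [hscan, ipSigma]
      rw [ih]
      have hR' : L.filter (fun t => !decide (t.2.1 ∈ jlist ++ [(0 : Int)])) = [] := by
        rw [show (fun (t : Int × Int × Int) => !decide (t.2.1 ∈ jlist ++ [(0 : Int)]))
            = (fun t => (!(t.2.1 == 0)) && (!decide (t.2.1 ∈ jlist))) from by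
          funext t
          by_cases h1 : t.2.1 ∈ jlist <;> by_cases h2 : t.2.1 = (0 : Int) <;> simp [h1, h2]]
        rw [← List.filter_filter, hRnil]
        rfl
      rw [hR', hRnil]
      simp [List.replicate_succ]
    | some t =>
      have hRc : L.filter (fun u => !decide (u.2.1 ∈ jlist))
          = t :: (L.filter (fun u => !decide (u.2.1 ∈ jlist))).tail := by
        cases hc : L.filter (fun u => !decide (u.2.1 ∈ jlist)) with
        | nil => rw [hc] at hhead; simp at hhead
        | cons a l => rw [hc] at hhead; simp at hhead; simp [hhead]
      set rest := (L.filter (fun u => !decide (u.2.1 ∈ jlist))).tail with hrest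
      rw [hhead] at hscan
      simp only [hscan, ipSigma]
      rw [ih]
      have hRj : (L.filter (fun u => !decide (u.2.1 ∈ jlist))).Pairwise
          (fun a b => a.2.1 ≠ b.2.1) := hLj.filter _
      have htail : ∀ u ∈ rest, t.2.1 ≠ u.2.1 := by
        intro u hu
        exact (List.pairwise_cons.mp (hRc ▸ hRj)).1 u hu
      have hR' : L.filter (fun u => !decide (u.2.1 ∈ jlist ++ [t.2.1])) = rest := by
        rw [show (fun (u : Int × Int × Int) => !decide (u.2.1 ∈ jlist ++ [t.2.1]))
            = (fun u => (!(u.2.1 == t.2.1)) && (!decide (u.2.1 ∈ jlist))) from by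
          funext u
          by_cases h1 : u.2.1 ∈ jlist <;> by_cases h2 : u.2.1 = t.2.1 <;> simp [h1, h2]]
        rw [← List.filter_filter, hRc, List.filter_cons]
        simp only [beq_self_eq_true, Bool.not_true, Bool.false_and, Bool.false_eq_true, if_false]
        apply List.filter_eq_self.mpr
        intro u hu
        have h2 : u ∈ L.filter (fun u => !decide (u.2.1 ∈ jlist)) :=
          hRc ▸ List.mem_cons_of_mem _ hu
        have h3 := List.of_mem_filter h2
        simp [h3, (htail u hu).symm]
      rw [hR', hRc]
      simp [ipOut, Nat.succ_sub_succ]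

lemma ip_foldl_const {α β : Type} (xs : List α) (F : β → β) (init : β) :
    xs.foldl (fun s _ => F s) init = F^[xs.length] init := by
  induction xs generalizing init with
  | nil => rfl
  | cons x xs ih => simp [List.foldl_cons, ih, Function.iterate_succ_apply]

-- ===== VERDICT (by name: the statement is the Claim_ definition above) =====
theorem intelligent_purchase_spec : Claim_equal_intelligent_purchase := by
  intro P job _ hpre
  unfold Spec_intelligent_purchase
  obtain ⟨mask, K⟩ := job
  unfold Pre_intelligent_purchase at hpre
  unfold intelligent_purchase intelligent_purchase_alt
  simp only []
  by_cases hk : K ≤ 0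
  · rw [PySem.List.pyRange_one_eq_nil hk]
    have h0 : (max K 0).toNat = 0 := by omega
    simp [h0]
  · have hmask : P.length ≤ mask.length := by
      rcases hpre with h | h
      · omega
      · exact h
    rw [ip_sorted2_eq, ip_elig_eq P mask hmask]
    rw [ip_foldl_const (F := fun (st : List (Int × Int) × List Int) =>
        (st.1 ++ [((ipScan P mask st.2).2.1, (ipScan P mask st.2).2.2.1)],
         st.2 ++ [(ipScan P mask st.2).2.1]))]
    rw [PySem.List.length_pyRange_one]
    have hmain := ip_main P mask (PySem.List.sorted (eligD P mask) keyL false)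
      (PySem.List.sorted_perm _ _ _)
      (ip_sorted_pairwise_strict _ (ip_eligD_pairwise P mask))
      (ip_sorted_j_ne _ (ip_eligD_pairwise P mask))
      (K - 0).toNat [] []
    rw [show (fun (t : Int × Int × Int) => !decide (t.2.1 ∈ ([] : List Int)))
        = (fun (_ : Int × Int × Int) => true) from by funext t; simp] at hmain
    rw [List.filter_true] at hmain
    rw [hmain]
    rw [show ipOut = (fun (t : Int × Int × Int) => (t.2.1, t.2.2)) from rfl]
    have hn : (K - 0).toNat = (max K 0).toNat := by omega
    simp only [List.nil_append, hn, List.length_map, List.length_take]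
    congr 1
    congr 1
    omega
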